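-- pv_equiv track=rewrite | github.com/npow/context-bench | src/context_bench/evaluators/math_equivalence.py | _normalize_fractions
-- ===== SOURCE A (Python) =====
-- def _normalize_fractions(text: str) -> str:
--     r"""Convert \frac{a}{b} to (a)/(b), handling nested braces."""
--     result = []
--     i = 0
--     while i < len(text):
--         if text[i:].startswith(r"\frac"):
--             i += len(r"\frac")
--             # Skip optional whitespace
--             while i < len(text) and text[i] == " ":
--                 i += 1
--             num, i = _extract_brace_content(text, i)
--             # Skip optional whitespace
--             while i < len(text) and text[i] == " ":
--                 i += 1
--             den, i = _extract_brace_content(text, i)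
--             result.append(f"({num})/({den})")
--         else:
--             result.append(text[i])
--             i += 1
--     return "".join(result)
--
-- def _extract_brace_content(text: str, pos: int) -> tuple[str, int]:
--     """Extract content between { and }, returning (content, new_pos)."""
--     if pos >= len(text) or text[pos] != "{":
--         # No braces — take single character/token
--         if pos < len(text):
--             return text[pos], pos + 1
--         return "", pos
--     pos += 1  # skip {
--     depth = 1
--     content = []
--     while pos < len(text) and depth > 0:
--         if text[pos] == "{":
--             depth += 1
--             content.append(text[pos])
--         elif text[pos] == "}":
--             depth -= 1
--             if depth > 0:
--                 content.append(text[pos])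
--         else:
--             content.append(text[pos])
--         pos += 1
--     return "".join(content), pos
-- ===== SOURCE B (Python) =====
-- def _normalize_fractions(text: str) -> str:
--     r"""Convert \frac{a}{b} to (a)/(b): find-based scan copying slices verbatim."""
--     out = []
--     i = 0
--     n = len(text)
--     while True:
--         hit = text.find("\\frac", i)
--         if hit == -1:
--             out.append(text[i:])
--             break
--         out.append(text[i:hit])
--         j = hit + 5
--         while j < n and text[j] == " ":
--             j += 1
--         num, j = _take_group(text, j)
--         while j < n and text[j] == " ":
--             j += 1
--         den, j = _take_group(text, j)
--         out.append("(%s)/(%s)" % (num, den))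
--         i = j
--     return "".join(out)
--
--
-- def _take_group(text: str, pos: int) -> tuple[str, int]:
--     """Slice out one brace group (or a single char) starting at pos."""
--     if pos >= len(text) or text[pos] != "{":
--         if pos < len(text):
--             return text[pos], pos + 1
--         return "", pos
--     end = _matching_brace(text, pos)
--     if end == len(text):
--         return text[pos + 1:], end
--     return text[pos + 1:end], end + 1
--
--
-- def _matching_brace(text: str, pos: int) -> int:
--     """Index of the '}' matching text[pos] == '{', or len(text) if unmatched."""
--     depth = 0
--     for k in range(pos, len(text)):
--         c = text[k]
--         if c == "{":
--             depth += 1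
--         elif c == "}":
--             depth -= 1
--             if depth == 0:
--                 return k
--     return len(text)
-- ===== Notes on version B (the rewrite author's own statement) =====
-- stated objective: faster
-- what changed: Replaces A's char-by-char outer loop (whose text[i:].startswith copies a suffix at every position, and which appends one char at a time) with a str.find-based scan that copies inter-hit text as slices, extracting each brace group by computing the matching-brace index and slicing.
import Mathlib
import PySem

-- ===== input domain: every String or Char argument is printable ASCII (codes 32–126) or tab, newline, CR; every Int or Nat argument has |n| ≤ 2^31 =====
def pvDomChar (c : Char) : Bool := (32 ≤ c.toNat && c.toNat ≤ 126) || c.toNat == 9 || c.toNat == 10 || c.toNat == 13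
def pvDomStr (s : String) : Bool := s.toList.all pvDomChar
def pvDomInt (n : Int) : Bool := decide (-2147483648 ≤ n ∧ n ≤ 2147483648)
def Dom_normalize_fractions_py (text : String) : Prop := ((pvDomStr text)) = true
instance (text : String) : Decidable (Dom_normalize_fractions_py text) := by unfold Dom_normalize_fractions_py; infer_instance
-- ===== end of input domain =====

-- B replaces A's char-by-char scan with a find-based scan copying slices and a
-- matching-brace-index helper with take/drop slicing (objective: faster; avoids A's per-position suffix slice).

-- the literal r"\frac"
def pvFrac : List Char := ['\\', 'f', 'r', 'a', 'c']

-- ===== PORT A =====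
-- A's inner while loop of _extract_brace_content: appends chars to `content`, depth counting.
def pvBraceLoop : List Char → Nat → List Char → List Char × List Char
  | [], _, acc => (acc, [])
  | c :: rest, d, acc =>
    if c = '{' then pvBraceLoop rest (d + 1) (acc ++ [c])
    else if c = '}' then
      (if d = 1 then (acc, rest) else pvBraceLoop rest (d - 1) (acc ++ [c]))
    else pvBraceLoop rest d (acc ++ [c])

-- A's _extract_brace_content (position i becomes the remaining list)
def pvExtractA : List Char → List Char × List Char
  | [] => ([], [])
  | c :: rest => if c ≠ '{' then ([c], rest) else pvBraceLoop rest 1 []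

-- A's "while i < len(text) and text[i] == ' ': i += 1"
def pvSkipSp : List Char → List Char
  | [] => []
  | c :: rest => if c = ' ' then pvSkipSp rest else c :: rest

theorem pvSkipSp_len : ∀ l : List Char, (pvSkipSp l).length ≤ l.length := by
  intro l; induction l with
  | nil => simp [pvSkipSp]
  | cons c rest ih => simp only [pvSkipSp]; split <;> simp <;> omega

theorem pvBraceLoop_len : ∀ (l : List Char) (d : Nat) (acc : List Char),
    (pvBraceLoop l d acc).2.length ≤ l.length := by
  intro l; induction l with
  | nil => intro d acc; simp [pvBraceLoop]
  | cons c rest ih =>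
    intro d acc; simp only [pvBraceLoop]
    split_ifs <;> first
      | (exact le_trans (ih _ _) (by simp))
      | simp

theorem pvExtractA_len : ∀ l : List Char, (pvExtractA l).2.length ≤ l.length := by
  intro l; cases l with
  | nil => simp [pvExtractA]
  | cons c rest =>
    simp only [pvExtractA]; split
    · simp
    · exact le_trans (pvBraceLoop_len _ _ _) (by simp)

-- A's main while loop
def pvGoA : List Char → List Char
  | [] => []
  | c :: rest =>
    if pvFrac.isPrefixOf (c :: rest) then
      let e1 := pvExtractA (pvSkipSp ((c :: rest).drop 5))
      let e2 := pvExtractA (pvSkipSp e1.2)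
      '(' :: e1.1 ++ [')', '/', '('] ++ e2.1 ++ [')'] ++ pvGoA e2.2
    else c :: pvGoA rest
termination_by cs => cs.length
decreasing_by
  · have h1 := pvExtractA_len (pvSkipSp ((c :: rest).drop 5))
    have h2 := pvSkipSp_len ((c :: rest).drop 5)
    have h3 := pvExtractA_len (pvSkipSp (pvExtractA (pvSkipSp ((c :: rest).drop 5))).2)
    have h4 := pvSkipSp_len (pvExtractA (pvSkipSp ((c :: rest).drop 5))).2
    simp only [List.length_drop, List.length_cons] at *
    omega
  · simp

def normalize_fractions_py (text : String) : String :=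
  String.mk (pvGoA text.toList)

-- ===== PORT B =====
-- B's text.find("\frac", i): splits off the prefix before the first hit and the rest after it
def pvFindFrac : List Char → Option (List Char × List Char)
  | [] => none
  | c :: rest =>
    if pvFrac.isPrefixOf (c :: rest) then some ([], (c :: rest).drop 5)
    else (pvFindFrac rest).map (fun pr => (c :: pr.1, pr.2))

-- B's _matching_brace: relative index (from the opening '{') of the matching '}', none = unmatched
def pvMatchIdx : List Char → Nat → Option Nat
  | [], _ => none
  | c :: rest, d =>
    if c = '{' then (pvMatchIdx rest (d + 1)).map Nat.succ
    else if c = '}' then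
      (if d = 1 then some 0 else (pvMatchIdx rest (d - 1)).map Nat.succ)
    else (pvMatchIdx rest d).map Nat.succ

-- B's _take_group: slice by the matching-brace index
def pvTakeGroup : List Char → List Char × List Char
  | [] => ([], [])
  | c :: rest =>
    if c ≠ '{' then ([c], rest)
    else
      match pvMatchIdx (c :: rest) 0 with
      | none => (rest, [])
      | some k => (rest.take (k - 1), rest.drop k)

theorem pvTakeGroup_len : ∀ l : List Char, (pvTakeGroup l).2.length ≤ l.length := by
  intro l; cases l with
  | nil => simp [pvTakeGroup]
  | cons c rest =>
    simp only [pvTakeGroup]; split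
    · simp
    · split <;> simp <;> omega

theorem pvFindFrac_len : ∀ (cs : List Char) (pr : List Char × List Char),
    pvFindFrac cs = some pr → pr.2.length < cs.length := by
  intro cs; induction cs with
  | nil => intro pr h; simp [pvFindFrac] at h
  | cons c rest ih =>
    intro pr h
    simp only [pvFindFrac] at h
    split at h
    · rename_i hpre
      have hlen : 5 ≤ (c :: rest).length := by
        have := (List.isPrefixOf_iff_prefix.mp hpre).length_le
        simpa [pvFrac] using this
      cases h
      simp only [List.length_drop]
      omega
    · rcases Option.map_eq_some_iff.mp h with ⟨pr', h1, h2⟩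
      have := ih pr' h1
      cases h2
      simp only [List.length_cons]
      omega

def pvGoB (cs : List Char) : List Char :=
  match h : pvFindFrac cs with
  | none => cs
  | some pr =>
    let e1 := pvTakeGroup (pr.2.dropWhile (· = ' '))
    let e2 := pvTakeGroup (e1.2.dropWhile (· = ' '))
    pr.1 ++ '(' :: e1.1 ++ [')', '/', '('] ++ e2.1 ++ [')'] ++ pvGoB e2.2
termination_by cs.length
decreasing_by
  have h1 := pvFindFrac_len cs pr h
  have h2 := pvTakeGroup_len (pr.2.dropWhile (· = ' '))
  have h3 := List.length_dropWhile_le (p := (· = ' ')) pr.2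
  have h4 := pvTakeGroup_len ((pvTakeGroup (pr.2.dropWhile (· = ' '))).2.dropWhile (· = ' '))
  have h5 := List.length_dropWhile_le (p := (· = ' ')) (pvTakeGroup (pr.2.dropWhile (· = ' '))).2
  omega

def normalize_fractions_py_alt (text : String) : String :=
  String.mk (pvGoB text.toList)

-- ===== PRECONDITION & SPEC =====
def Spec_normalize_fractions_py (text : String) (out : String) : Prop := out = normalize_fractions_py_alt text
instance (text : String) (out : String) : Decidable (Spec_normalize_fractions_py text out) := by unfold Spec_normalize_fractions_py; infer_instance

-- ===== CLAIM (what is proved, stated in full; the proofs are below) =====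
def Claim_equal_normalize_fractions_py : Prop := ∀ (text : String), Dom_normalize_fractions_py text → Spec_normalize_fractions_py text (normalize_fractions_py text)

-- ===== LEMMAS AND PROOFS =====

theorem pvSkipSp_eq_dropWhile : ∀ l : List Char, pvSkipSp l = l.dropWhile (· = ' ') := by
  intro l; induction l with
  | nil => rfl
  | cons c rest ih =>
    simp only [pvSkipSp, List.dropWhile_cons]
    by_cases h : c = ' '
    · simp [h, ih]
    · simp [h]

theorem pvGoB_eq (cs : List Char) : pvGoB cs =
    match pvFindFrac cs with
    | none => cs
    | some pr =>
      let e1 := pvTakeGroup (pr.2.dropWhile (· = ' '))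
      let e2 := pvTakeGroup (e1.2.dropWhile (· = ' '))
      pr.1 ++ '(' :: e1.1 ++ [')', '/', '('] ++ e2.1 ++ [')'] ++ pvGoB e2.2 := by
  rw [pvGoB.eq_def]; cases hff : pvFindFrac cs <;> simp [hff]

theorem pvBraceLoop_eq_matchIdx : ∀ (l : List Char) (d : Nat) (acc : List Char), 1 ≤ d →
    pvBraceLoop l d acc =
      match pvMatchIdx l d with
      | none => (acc ++ l, [])
      | some k => (acc ++ l.take k, l.drop (k + 1)) := by
  intro l; induction l with
  | nil => intro d acc _; simp [pvBraceLoop, pvMatchIdx]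
  | cons c rest ih =>
    intro d acc hd
    simp only [pvBraceLoop, pvMatchIdx]
    split_ifs with h1 h2 h3
    · rw [ih (d + 1) (acc ++ [c]) (by omega)]
      cases hmi : pvMatchIdx rest (d + 1) <;> simp [hmi]
    · simp [h3]
    · rw [ih (d - 1) (acc ++ [c]) (by omega)]
      cases hmi : pvMatchIdx rest (d - 1) <;> simp [hmi, h3]
    · rw [ih d (acc ++ [c]) hd]
      cases hmi : pvMatchIdx rest d <;> simp [hmi]

theorem pvExtractA_eq_takeGroup : ∀ l : List Char, pvExtractA l = pvTakeGroup l := by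
  intro l; cases l with
  | nil => rfl
  | cons c rest =>
    simp only [pvExtractA, pvTakeGroup]
    split_ifs with h
    · rfl
    · have hc : c = '{' := by simpa using h
      subst hc
      rw [pvBraceLoop_eq_matchIdx rest 1 [] (le_refl 1)]
      simp only [pvMatchIdx, if_pos rfl]
      cases hmi : pvMatchIdx rest 1 with
      | none => simp [hmi]
      | some k => simp [hmi]

theorem pvGoA_eq_goB : ∀ (n : Nat) (cs : List Char), cs.length ≤ n → pvGoA cs = pvGoB cs := by
  intro n
  induction n with
  | zero =>
    intro cs h
    have : cs = [] := by cases cs <;> simp_all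
    subst this
    simp [pvGoA, pvGoB_eq, pvFindFrac]
  | succ n ih =>
    intro cs hlen
    cases cs with
    | nil => simp [pvGoA, pvGoB_eq, pvFindFrac]
    | cons c rest =>
      rw [pvGoA]
      by_cases hpre : pvFrac.isPrefixOf (c :: rest)
      · -- \frac at position 0: pvFindFrac = some ([], drop 5)
        have hff : pvFindFrac (c :: rest) = some ([], (c :: rest).drop 5) := by
          simp [pvFindFrac, hpre]
        rw [pvGoB_eq]
        simp only [hff, if_pos hpre]
        rw [pvSkipSp_eq_dropWhile, pvExtractA_eq_takeGroup,
            pvSkipSp_eq_dropWhile, pvExtractA_eq_takeGroup]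
        simp only [List.nil_append]
        congr 1
        have h1 := pvTakeGroup_len (((c :: rest).drop 5).dropWhile (· = ' '))
        have h2 := List.length_dropWhile_le (p := (· = ' ')) ((c :: rest).drop 5)
        have h3 := pvTakeGroup_len ((pvTakeGroup (((c :: rest).drop 5).dropWhile (· = ' '))).2.dropWhile (· = ' '))
        have h4 := List.length_dropWhile_le (p := (· = ' ')) (pvTakeGroup (((c :: rest).drop 5).dropWhile (· = ' '))).2
        apply ih
        simp only [List.length_drop, List.length_cons] at *
        omega
      · have hrec : pvGoA rest = pvGoB rest := ih rest (by simpa using Nat.lt_succ_iff.mp (by simpa using hlen))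
        simp only [if_neg hpre]
        rw [hrec]
        rw [pvGoB_eq (c :: rest), pvGoB_eq rest]
        simp only [pvFindFrac, if_neg hpre]
        cases hff : pvFindFrac rest with
        | none => simp [hff]
        | some pr => simp [hff]

-- ===== VERDICT (by name: the statement is the Claim_ definition above) =====
theorem normalize_fractions_py_spec : Claim_equal_normalize_fractions_py := by
  intro text _
  unfold Spec_normalize_fractions_py normalize_fractions_py normalize_fractions_py_alt
  rw [pvGoA_eq_goB text.toList.length text.toList (le_refl _)]
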